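-- pv_equiv track=rewrite | github.com/scelmore1/Information-Retrieval-From-NewsAPI-and-Robinhood-API | Final Project Functions.py | expandToFullArray
-- ===== SOURCE A (Python) =====
-- def expandToFullArray(local_query_results, term_doc_df, indices):
--     # use to expand the local query results to the entire term array
--     full_array_query_results = []
--     c = 0
--     for i in range(len(term_doc_df)):
--         if i in indices:
--             full_array_query_results.append(local_query_results[c])
--             c += 1
--         else:
--             full_array_query_results.append(0)
--     return full_array_query_results
-- ===== SOURCE B (Python) =====
-- def expandToFullArray(local_query_results, term_doc_df, indices):
--     # allocate the full-length zero array once, then scatter the local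
--     # results into the (sorted, distinct, in-range) hit positions
--     n = len(term_doc_df)
--     full = [0] * n
--     hits = sorted({i for i in indices if 0 <= i < n})
--     c = 0
--     for i in hits:
--         full[i] = local_query_results[c]
--         c += 1
--     return full
-- ===== Notes on version B (the rewrite author's own statement) =====
-- stated objective: faster
-- what changed: Replaces the scan of every position with an 'i in indices' membership test per position by allocating a zero array and scattering the local results into the sorted distinct in-range index positions.
import Mathlib
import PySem

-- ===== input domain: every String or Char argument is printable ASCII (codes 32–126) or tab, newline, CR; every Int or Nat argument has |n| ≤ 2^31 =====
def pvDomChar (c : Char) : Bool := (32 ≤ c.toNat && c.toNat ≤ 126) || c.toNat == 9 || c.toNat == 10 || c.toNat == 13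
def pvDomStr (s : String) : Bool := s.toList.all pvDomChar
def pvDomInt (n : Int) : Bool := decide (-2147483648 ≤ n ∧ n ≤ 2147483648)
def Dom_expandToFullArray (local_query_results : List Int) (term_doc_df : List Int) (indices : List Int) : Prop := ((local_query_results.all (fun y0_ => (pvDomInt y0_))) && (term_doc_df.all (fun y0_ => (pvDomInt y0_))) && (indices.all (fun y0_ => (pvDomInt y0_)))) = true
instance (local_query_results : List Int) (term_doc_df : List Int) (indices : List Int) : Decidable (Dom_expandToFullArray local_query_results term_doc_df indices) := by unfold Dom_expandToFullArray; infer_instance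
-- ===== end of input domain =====

-- B replaces A's scan of every position with a per-position membership test by a
-- zero-initialized array scattered over the sorted distinct in-range indices (measured faster in a timing run).


-- ===== PORT A =====
-- for-loop over range(len(term_doc_df)) with accumulator (result list, counter c);
-- local_query_results[c] (c always ≥ 0) is PySem.List.pyGet?; where Python raises
-- IndexError (pyGet? = none, excluded by Pre_) the port takes the default 0.
def expandToFullArray (local_query_results : List Int) (term_doc_df : List Int) (indices : List Int) : List Int :=
  ((PySem.List.pyRange 0 (term_doc_df.length : Int) 1).foldl
    (fun (st : List Int × Int) i =>
      if i ∈ indices then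
        (st.1 ++ [(PySem.List.pyGet? local_query_results st.2).getD 0], st.2 + 1)
      else
        (st.1 ++ [0], st.2)) (([] : List Int), (0 : Int))).1

-- ===== PORT B =====
-- the scatter loop 'full[i] = local_query_results[c]; c += 1' over the hit list;
-- i is always ≥ 0 and < len(full) by construction, so Python's full[i] = v is exactly
-- List.set i.toNat v; local_query_results[c] as in port A.
def pvScatter (local_query_results : List Int) (hits : List Int) (c : Int) (full : List Int) : List Int :=
  match hits with
  | [] => full
  | i :: rest =>
      pvScatter local_query_results rest (c + 1)
        (full.set i.toNat ((PySem.List.pyGet? local_query_results c).getD 0))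

-- sorted({i for i in indices if 0 <= i < n}) is PySem.List.sorted (PySem.Set.ofList (filter …))
def expandToFullArray_alt (local_query_results : List Int) (term_doc_df : List Int) (indices : List Int) : List Int :=
  let n := term_doc_df.length
  let hits := PySem.List.sorted
    (PySem.Set.ofList (indices.filter (fun x => decide (0 ≤ x ∧ x < (n : Int)))))
    (fun x => x) false
  pvScatter local_query_results hits 0 (List.replicate n 0)

-- ===== PRECONDITION & SPEC =====
-- Pre_ excludes exactly the inputs on which Python A raises IndexError: when the number of
-- positions i < len(term_doc_df) with i ∈ indices exceeds len(local_query_results)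
-- (Python B raises IndexError on exactly the same inputs).
def Pre_expandToFullArray (local_query_results : List Int) (term_doc_df : List Int) (indices : List Int) : Prop :=
  (List.range term_doc_df.length).countP (fun (j : Nat) => decide ((j : Int) ∈ indices)) ≤ local_query_results.length
instance (local_query_results : List Int) (term_doc_df : List Int) (indices : List Int) : Decidable (Pre_expandToFullArray local_query_results term_doc_df indices) := by unfold Pre_expandToFullArray; infer_instance

def pvWitness_expandToFullArray : List Int × List Int × List Int := ([7, 9], [5, 5, 5, 5], [1, 3, 6])

def Spec_expandToFullArray (local_query_results : List Int) (term_doc_df : List Int) (indices : List Int) (out : List Int) : Prop := out = expandToFullArray_alt local_query_results term_doc_df indices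
instance (local_query_results : List Int) (term_doc_df : List Int) (indices : List Int) (out : List Int) : Decidable (Spec_expandToFullArray local_query_results term_doc_df indices out) := by unfold Spec_expandToFullArray; infer_instance

-- ===== CLAIM (what is proved, stated in full; the proofs are below) =====
def Claim_equal_expandToFullArray : Prop := ∀ (local_query_results : List Int) (term_doc_df : List Int) (indices : List Int), Dom_expandToFullArray local_query_results term_doc_df indices → Pre_expandToFullArray local_query_results term_doc_df indices → Spec_expandToFullArray local_query_results term_doc_df indices (expandToFullArray local_query_results term_doc_df indices)

-- ===== LEMMAS AND PROOFS =====

-- the common description both ports are reduced to: position j holds 0 unless j ∈ indices,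
-- in which case it holds local[#hits below j] (with the out-of-range default 0 of the ports)
def pvVal (l idx : List Int) (j : Nat) : Int :=
  if (j : Int) ∈ idx then
    (PySem.List.pyGet? l
      (((List.range j).countP (fun (t : Nat) => decide ((t : Int) ∈ idx)) : Nat) : Int)).getD 0
  else 0

-- A's loop invariant: after the first n positions the accumulator is the mapped prefix and
-- the counter is the number of hit positions seen
lemma pvA_inv (l idx : List Int) (n : Nat) :
    (PySem.List.pyRange 0 (n : Int) 1).foldl
      (fun (st : List Int × Int) i =>
        if i ∈ idx then
          (st.1 ++ [(PySem.List.pyGet? l st.2).getD 0], st.2 + 1)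
        else
          (st.1 ++ [0], st.2)) (([] : List Int), (0 : Int))
    = ((List.range n).map (pvVal l idx),
       (((List.range n).countP (fun (t : Nat) => decide ((t : Int) ∈ idx)) : Nat) : Int)) := by
  induction n with
  | zero => simp
  | succ n ih =>
      have hc : ((n + 1 : Nat) : Int) = (n : Int) + 1 := by push_cast; ring
      rw [hc, PySem.List.pyRange_one_succ_right (by positivity), List.foldl_append, ih]
      simp only [List.foldl_cons, List.foldl_nil, List.range_succ, List.map_append,
        List.map_cons, List.map_nil]
      by_cases h : (n : Int) ∈ idx
      · simp [h, pvVal]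
      · simp [h, pvVal]

-- B's hit list is the increasing enumeration of the hit positions
lemma pvHits_eq (idx : List Int) (n : Nat) :
    PySem.List.sorted
      (PySem.Set.ofList (idx.filter (fun x => decide (0 ≤ x ∧ x < (n : Int)))))
      (fun x => x) false
    = ((List.range n).filter (fun (j : Nat) => decide ((j : Int) ∈ idx))).map
        (fun (j : Nat) => (j : Int)) := by
  apply PySem.List.sorted_eq_of_perm_of_pairwise_lt
  · apply (List.perm_ext_iff_of_nodup ?nd1 ?nd2).2
    · intro x
      simp only [List.mem_map, List.mem_filter, List.mem_range, PySem.Set.mem_ofList,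
        decide_eq_true_eq]
      constructor
      · rintro ⟨j, ⟨hj, hm⟩, rfl⟩
        exact ⟨hm, by positivity, by exact_mod_cast hj⟩
      · rintro ⟨hm, h0, hn⟩
        exact ⟨x.toNat, ⟨by omega, by rwa [Int.toNat_of_nonneg h0]⟩, Int.toNat_of_nonneg h0⟩
    case nd1 =>
      exact ((List.nodup_range).filter _).map (fun a b h => by exact_mod_cast h)
    case nd2 => exact PySem.Set.nodup_ofList _
  · refine List.Pairwise.map _ (fun a b h => ?_) (List.Pairwise.filter _ List.pairwise_lt_range)
    exact_mod_cast h

-- what the scatter loop leaves at position j (for a nodup hit list)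
lemma pvScatter_getElem? (l : List Int) (H : List Nat) (c : Int) (full : List Int)
    (nd : H.Nodup) (j : Nat) :
    (pvScatter l (H.map (fun (k : Nat) => (k : Int))) c full)[j]? =
      if j ∈ H then
        (if j < full.length then some ((PySem.List.pyGet? l (c + (H.idxOf j : Nat))).getD 0) else none)
      else full[j]? := by
  induction H generalizing c full with
  | nil => simp [pvScatter]
  | cons i rest ih =>
      rw [List.map_cons, pvScatter]
      simp only [Int.toNat_natCast]
      rw [ih _ _ (List.nodup_cons.1 nd).2]
      by_cases hji : j = i
      · subst hji
        have hnr : j ∉ rest := (List.nodup_cons.1 nd).1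
        simp [hnr, List.getElem?_set, List.idxOf_cons_self]
      · have hij : i ≠ j := fun h => hji h.symm
        by_cases hjr : j ∈ rest
        · simp only [hjr, if_true, List.mem_cons, hji, false_or, List.length_set]
          rw [List.idxOf_cons_ne _ (by exact_mod_cast hij)]
          have harg : c + ((rest.idxOf j).succ : Int) = c + 1 + ((rest.idxOf j : Nat) : Int) := by
            push_cast; ring
          rw [harg]
        · simp [hjr, hji, List.getElem?_set_ne hij]

-- rank of a hit position in the hit list = number of hit positions below it
lemma pvIdxOf_filter_range (p : Nat → Bool) (n j : Nat)
    (hj : j ∈ (List.range n).filter p) :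
    ((List.range n).filter p).idxOf j = (List.range j).countP p := by
  induction n with
  | zero => simp at hj
  | succ n ih =>
      rw [List.range_succ, List.filter_append] at hj ⊢
      by_cases hjn : j ∈ (List.range n).filter p
      · rw [List.idxOf_append_of_mem hjn, ih hjn]
      · have hj' : j = n ∧ p n = true := by
          rcases List.mem_append.1 hj with h | h
          · exact absurd h hjn
          · simp only [List.filter_singleton] at h
            by_cases hp : p n
            · simp [hp] at h; exact ⟨h, hp⟩
            · simp [hp] at h
        obtain ⟨rfl, hp⟩ := hj'
        rw [List.idxOf_append_of_notMem hjn]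
        simp only [List.filter_singleton, hp]
        have : List.idxOf j [j] = 0 := by simp
        rw [List.countP_eq_length_filter]
        simp [this]

lemma pvPorts_eq (l td idx : List Int) :
    expandToFullArray l td idx = expandToFullArray_alt l td idx := by
  set n := td.length with hn
  set p : Nat → Bool := fun j => decide ((j : Int) ∈ idx) with hp
  have hA : expandToFullArray l td idx = (List.range n).map (pvVal l idx) := by
    rw [expandToFullArray, pvA_inv]
  have hndH : ((List.range n).filter p).Nodup := (List.nodup_range).filter _
  have hB : expandToFullArray_alt l td idx
      = pvScatter l (((List.range n).filter p).map (fun (j : Nat) => (j : Int))) 0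
          (List.replicate n 0) := by
    simp only [expandToFullArray_alt]
    rw [pvHits_eq idx n]
  rw [hA, hB]
  apply List.ext_getElem?
  intro j
  rw [pvScatter_getElem? l _ 0 _ hndH j]
  by_cases hjH : j ∈ (List.range n).filter p
  · have hjn : j < n := List.mem_range.1 (List.mem_filter.1 hjH).1
    have hpj : p j = true := (List.mem_filter.1 hjH).2
    rw [pvIdxOf_filter_range p n j hjH]
    simp only [hjH, if_true, List.length_replicate, hjn, List.getElem?_map,
      List.getElem?_range hjn]
    simp only [hp] at hpj
    simp only [Option.map_some, pvVal, if_pos (of_decide_eq_true hpj)]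
    norm_num
    rfl
  · simp only [hjH, if_false, List.getElem?_replicate, List.getElem?_map]
    by_cases hjn : j < n
    · have hpj : p j = false := by
        by_contra h
        exact hjH (List.mem_filter.2 ⟨List.mem_range.2 hjn, by simpa using h⟩)
      simp only [List.getElem?_range hjn, hjn, if_true, Option.map_some, pvVal]
      rw [if_neg (by simpa [hp] using hpj)]
    · rw [List.getElem?_eq_none (by simpa using (by omega : n ≤ j))]
      simp [hjn]

-- ===== VERDICT (by name: the statement is the Claim_ definition above) =====
theorem expandToFullArray_spec : Claim_equal_expandToFullArray := by
  intro l td idx _ _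
  unfold Spec_expandToFullArray
  exact pvPorts_eq l td idx
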